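-- pv_equiv track=rewrite | github.com/james5635/GeekForGeek-Data-Structure-and-Algorithm | sorting/hard/surpasser_count/solution.py | find_surpasser_merge_sort
-- ===== SOURCE A (Python) =====
-- def find_surpasser_merge_sort(arr):
--     """
--     Find surpasser count using modified merge sort.
--     Optimal O(n log n) solution.
--
--     Args:
--         arr: Input array
--
--     Returns:
--         list: Surpasser count for each element
--     """
--     if not arr:
--         return []
--
--     n = len(arr)
--
--     # Store (value, original_index) pairs
--     indexed_arr = [(arr[i], i) for i in range(n)]
--     surpasser_count = [0] * n
--
--     def merge_sort(left, right):
--         """Modified merge sort to count surpassers."""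
--         if left >= right:
--             return
--
--         mid = (left + right) // 2
--         merge_sort(left, mid)
--         merge_sort(mid + 1, right)
--         merge(left, mid, right)
--
--     def merge(left, mid, right):
--         """Merge two sorted halves and count surpassers."""
--         temp = []
--         i, j = left, mid + 1
--
--         while i <= mid and j <= right:
--             if indexed_arr[i][0] < indexed_arr[j][0]:
--                 # Element from left is smaller
--                 # All remaining elements in right are greater
--                 temp.append(indexed_arr[i])
--                 # Count elements in right half that are greater
--                 surpasser_count[indexed_arr[i][1]] += right - j + 1
--                 i += 1
--             else:
--                 # Element from right is smaller or equal
--                 temp.append(indexed_arr[j])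
--                 j += 1
--
--         while i <= mid:
--             temp.append(indexed_arr[i])
--             i += 1
--
--         while j <= right:
--             temp.append(indexed_arr[j])
--             j += 1
--
--         # Copy back to original array
--         for idx in range(len(temp)):
--             indexed_arr[left + idx] = temp[idx]
--
--     merge_sort(0, n - 1)
--     return surpasser_count
-- ===== SOURCE B (Python) =====
-- def find_surpasser_merge_sort(arr):
--     """Surpasser count per element: direct scan of each suffix."""
--     return [sum(1 for y in arr[i + 1:] if y > x) for i, x in enumerate(arr)]
-- ===== Notes on version B (the rewrite author's own statement) =====
-- stated objective: simpler
-- what changed: Replaces the modified merge sort with in-place index bookkeeping by a one-line comprehension that counts strictly greater elements in each suffix directly.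
import Mathlib
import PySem

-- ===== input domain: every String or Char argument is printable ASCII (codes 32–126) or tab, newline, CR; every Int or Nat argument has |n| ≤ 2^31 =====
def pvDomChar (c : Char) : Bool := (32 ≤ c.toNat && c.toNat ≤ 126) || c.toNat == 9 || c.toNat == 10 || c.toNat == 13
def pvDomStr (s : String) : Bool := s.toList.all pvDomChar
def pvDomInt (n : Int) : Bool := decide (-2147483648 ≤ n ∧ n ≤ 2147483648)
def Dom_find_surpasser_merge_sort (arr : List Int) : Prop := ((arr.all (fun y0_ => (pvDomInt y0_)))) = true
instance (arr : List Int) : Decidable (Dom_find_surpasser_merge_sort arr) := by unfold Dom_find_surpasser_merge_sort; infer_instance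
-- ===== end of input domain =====

-- B replaces A's modified merge sort with in-place count bookkeeping by a one-line
-- per-suffix count (simpler; not faster).

-- ===== PORT A =====
-- A's inner `merge`: the while-loops over indices i ≤ mid, j ≤ right become structural
-- recursion over the two remaining (sorted) halves; `surpasser_count[idx] += right - j + 1`
-- becomes a `modify` by the length of the remaining right half (= right - j + 1).
-- State carried: (merged segment replacing indexed_arr[left..right], surpasser_count list).
def pvMerge : List Int → List (Int × Nat) → List (Int × Nat) → List (Int × Nat) × List Int
  | sc, [], R => (R, sc)
  | sc, x :: L', [] => (x :: L', sc)
  | sc, (v, p) :: L', (w, q) :: R' =>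
    if v < w then
      let res := pvMerge (sc.modify p (fun c => c + (((w, q) :: R').length : Int))) L' ((w, q) :: R')
      ((v, p) :: res.1, res.2)
    else
      let res := pvMerge sc ((v, p) :: L') R'
      ((w, q) :: res.1, res.2)
termination_by _ L R => L.length + R.length

-- A's `merge_sort(left, right)` acting on the segment indexed_arr[left..right]:
-- `left >= right` is `length ≤ 1`; the split at mid = (left+right)//2 keeps
-- mid-left+1 = ⌈m/2⌉ elements on the left of a segment of length m.
def pvMergeSort (sc : List Int) (seg : List (Int × Nat)) : List (Int × Nat) × List Int :=
  if h : seg.length ≤ 1 then (seg, sc)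
  else
    let k := (seg.length + 1) / 2
    let r1 := pvMergeSort sc (seg.take k)
    let r2 := pvMergeSort r1.2 (seg.drop k)
    pvMerge r2.2 r1.1 r2.1
termination_by seg.length
decreasing_by
  · simp only [List.length_take]; omega
  · simp only [List.length_drop]; omega

def find_surpasser_merge_sort (arr : List Int) : List Int :=
  if arr = [] then []
  else
    let ia := arr.zipIdx            -- [(arr[i], i) for i in range(n)]
    let sc := List.replicate arr.length (0 : Int)   -- [0] * n
    (pvMergeSort sc ia).2

-- ===== PORT B =====
-- [sum(1 for y in arr[i+1:] if y > x) for i, x in enumerate(arr)]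
def find_surpasser_merge_sort_alt (arr : List Int) : List Int :=
  arr.zipIdx.map (fun xi => (((arr.drop (xi.2 + 1)).countP (fun y => xi.1 < y) : Nat) : Int))

-- ===== PRECONDITION & SPEC =====
def Spec_find_surpasser_merge_sort (arr : List Int) (out : List Int) : Prop := out = find_surpasser_merge_sort_alt arr
instance (arr : List Int) (out : List Int) : Decidable (Spec_find_surpasser_merge_sort arr out) := by unfold Spec_find_surpasser_merge_sort; infer_instance

-- ===== CLAIM (what is proved, stated in full; the proofs are below) =====
def Claim_equal_find_surpasser_merge_sort : Prop := ∀ (arr : List Int), Dom_find_surpasser_merge_sort arr → Spec_find_surpasser_merge_sort arr (find_surpasser_merge_sort arr)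

-- ===== LEMMAS AND PROOFS =====

-- surpasser pairs inside a segment, attributed to original index q
def invc : List (Int × Nat) → Nat → Nat
  | [], _ => 0
  | (v, p) :: t, q => (if p = q then t.countP (fun w => v < w.1) else 0) + invc t q

-- cross count added by merging halves L and R, attributed to original index q
def addc (L R : List (Int × Nat)) (q : Nat) : Nat :=
  (L.map (fun vp => if vp.2 = q then R.countP (fun w => vp.1 < w.1) else 0)).sum

lemma addc_nil (L : List (Int × Nat)) (q : Nat) : addc L [] q = 0 := by
  simp [addc]

lemma addc_cons_right {L : List (Int × Nat)} {w : Int × Nat} {R' : List (Int × Nat)} (q : Nat)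
    (h : ∀ vp ∈ L, ¬ vp.1 < w.1) : addc L (w :: R') q = addc L R' q := by
  unfold addc
  congr 1
  apply List.map_congr_left
  intro vp hvp
  have hne : List.countP (fun z => decide (vp.1 < z.1)) (w :: R') =
      List.countP (fun z => decide (vp.1 < z.1)) R' :=
    List.countP_cons_of_neg (by simpa using h vp hvp)
  rw [hne]

lemma addc_perm_left {L L' : List (Int × Nat)} (R : List (Int × Nat)) (q : Nat)
    (h : L.Perm L') : addc L R q = addc L' R q := by
  unfold addc; exact (h.map _).sum_eq

lemma addc_perm_right (L : List (Int × Nat)) {R R' : List (Int × Nat)} (q : Nat)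
    (h : R.Perm R') : addc L R q = addc L R' q := by
  unfold addc
  congr 1
  apply List.map_congr_left
  intro vp _
  rw [h.countP_eq]

lemma invc_append (A B : List (Int × Nat)) (q : Nat) :
    invc (A ++ B) q = invc A q + invc B q + addc A B q := by
  induction A with
  | nil => simp [invc, addc]
  | cons hd t ih =>
    obtain ⟨v, p⟩ := hd
    simp only [List.cons_append, invc, ih, addc, List.map_cons, List.sum_cons,
      List.countP_append]
    by_cases hp : p = q
    · simp [hp]; omega
    · simp [hp]

lemma pvMerge_fst_perm (sc : List Int) (L R : List (Int × Nat)) :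
    ((pvMerge sc L R).1).Perm (L ++ R) := by
  fun_induction pvMerge sc L R with
  | case1 sc R => simp
  | case2 sc x L' => simp
  | case3 sc v p L' w q R' hvw res ih =>
    simpa using ih.cons (v, p)
  | case4 sc v p L' w q R' hvw res ih =>
    exact (ih.cons (w, q)).trans List.perm_middle.symm

lemma pvMerge_fst_sorted (sc : List Int) (L R : List (Int × Nat))
    (hL : L.Pairwise (fun a b => a.1 ≤ b.1)) (hR : R.Pairwise (fun a b => a.1 ≤ b.1)) :
    ((pvMerge sc L R).1).Pairwise (fun a b => a.1 ≤ b.1) := by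
  fun_induction pvMerge sc L R with
  | case1 sc R => exact hR
  | case2 sc x L' => exact hL
  | case3 sc v p L' w q R' hvw res ih =>
    rw [List.pairwise_cons]
    refine ⟨?_, ih hL.of_cons hR⟩
    intro y hy
    have hy' : y ∈ L' ++ (w, q) :: R' := (pvMerge_fst_perm _ _ _).mem_iff.mp hy
    rcases List.mem_append.mp hy' with h | h
    · exact (List.pairwise_cons.mp hL).1 y h
    · rcases List.mem_cons.mp h with h | h
      · subst h; exact le_of_lt hvw
      · exact le_of_lt (lt_of_lt_of_le hvw ((List.pairwise_cons.mp hR).1 y h))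
  | case4 sc v p L' w q R' hvw res ih =>
    rw [List.pairwise_cons]
    refine ⟨?_, ih hL hR.of_cons⟩
    intro y hy
    have hy' : y ∈ ((v, p) :: L') ++ R' := (pvMerge_fst_perm _ _ _).mem_iff.mp hy
    have hwv : w ≤ v := le_of_not_gt hvw
    rcases List.mem_append.mp hy' with h | h
    · rcases List.mem_cons.mp h with h | h
      · subst h; exact hwv
      · exact le_trans hwv ((List.pairwise_cons.mp hL).1 y h)
    · exact (List.pairwise_cons.mp hR).1 y h

lemma pvMerge_snd_length (sc : List Int) (L R : List (Int × Nat)) :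
    ((pvMerge sc L R).2).length = sc.length := by
  fun_induction pvMerge sc L R with
  | case1 sc R => rfl
  | case2 sc x L' => rfl
  | case3 sc v p L' w q R' hvw res ih => simpa using ih
  | case4 sc v p L' w q R' hvw res ih => simpa using ih

lemma pvMerge_snd (sc : List Int) (L R : List (Int × Nat))
    (hL : L.Pairwise (fun a b => a.1 ≤ b.1)) (hR : R.Pairwise (fun a b => a.1 ≤ b.1))
    (hidx : ∀ vp ∈ L, vp.2 < sc.length) (q : Nat) (hq : q < sc.length) :
    ((pvMerge sc L R).2)[q]?.getD 0 = sc[q]?.getD 0 + (addc L R q : Int) := by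
  fun_induction pvMerge sc L R with
  | case1 sc R => simp [addc]
  | case2 sc x L' => simp [addc_nil]
  | case3 sc v p L' w qq R' hvw res ih =>
    have hlen : (sc.modify p (fun c => c + (((w, qq) :: R').length : Int))).length = sc.length :=
      List.length_modify _ _ _
    have ih' := ih hL.of_cons hR
      (fun vp h => by rw [hlen]; exact hidx vp (List.mem_cons_of_mem _ h)) (by omega)
    rw [ih']
    have hcount : ((w, qq) :: R').countP (fun x => decide (v < x.1)) = ((w, qq) :: R').length := by
      apply List.countP_eq_length.mpr
      intro x hx
      rcases List.mem_cons.mp hx with h | h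
      · subst h; simpa using hvw
      · simp only [decide_eq_true_eq]
        exact lt_of_lt_of_le hvw ((List.pairwise_cons.mp hR).1 x h)
    have hmod : (sc.modify p (fun c => c + (((w, qq) :: R').length : Int)))[q]?.getD 0 =
        sc[q]?.getD 0 + (if p = q then (((w, qq) :: R').length : Int) else 0) := by
      rw [List.getElem?_modify]
      rcases List.getElem?_eq_some_iff.mpr ⟨hq, rfl⟩ with h
      rw [h]
      by_cases hpq : p = q <;> simp [hpq]
    rw [hmod]
    simp only [addc, List.map_cons, List.sum_cons, hcount]
    by_cases hpq : p = q
    · simp [hpq]; ring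
    · simp [hpq]
  | case4 sc v p L' w qq R' hvw res ih =>
    have hall : ∀ vp ∈ (v, p) :: L', ¬ vp.1 < (w, qq).1 := by
      intro vp hvp
      have hwv : w ≤ v := le_of_not_gt hvw
      rcases List.mem_cons.mp hvp with h | h
      · subst h; simpa using not_lt_of_ge hwv
      · exact not_lt_of_ge (le_trans hwv ((List.pairwise_cons.mp hL).1 vp h))
    rw [ih hL hR.of_cons hidx hq, addc_cons_right q hall]

lemma pvMergeSort_spec (sc : List Int) (seg : List (Int × Nat))
    (hidx : ∀ vp ∈ seg, vp.2 < sc.length) :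
    ((pvMergeSort sc seg).1).Perm seg ∧
    ((pvMergeSort sc seg).1).Pairwise (fun a b => a.1 ≤ b.1) ∧
    ((pvMergeSort sc seg).2).length = sc.length ∧
    ∀ q, q < sc.length →
      ((pvMergeSort sc seg).2)[q]?.getD 0 = sc[q]?.getD 0 + (invc seg q : Int) := by
  fun_induction pvMergeSort sc seg with
  | case1 sc seg h =>
    refine ⟨List.Perm.refl _, ?_, rfl, ?_⟩
    · match seg, h with
      | [], _ => exact List.Pairwise.nil
      | [x], _ => simp
    · intro q hq
      match seg with
      | [] => simp [invc]
      | [x] => obtain ⟨v, p⟩ := x; simp [invc]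
  | case2 sc seg h k r1 r2 iht iht' ihd =>
    clear iht'
    have e1 : r1 = pvMergeSort sc (List.take k seg) := rfl
    have e2 : r2 = pvMergeSort r1.2 (List.drop k seg) := rfl
    rw [e2, e1] at *
    have hxt : ∀ vp ∈ List.take k seg, vp.2 < sc.length :=
      fun vp hv => hidx vp (List.mem_of_mem_take hv)
    obtain ⟨P1, S1, Len1, C1⟩ := iht hxt
    have hxd : ∀ vp ∈ List.drop k seg,
        vp.2 < (pvMergeSort sc (List.take k seg)).2.length := by
      rw [Len1]; exact fun vp hv => hidx vp (List.mem_of_mem_drop hv)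
    obtain ⟨P2, S2, Len2, C2⟩ := ihd hxd
    refine ⟨?_, ?_, ?_, ?_⟩
    · exact ((pvMerge_fst_perm _ _ _).trans (P1.append P2)).trans
        (by rw [List.take_append_drop])
    · exact pvMerge_fst_sorted _ _ _ S1 S2
    · exact (pvMerge_snd_length _ _ _).trans (Len2.trans Len1)
    · intro q hq
      have hidx1 : ∀ vp ∈ (pvMergeSort sc (List.take k seg)).1,
          vp.2 < (pvMergeSort (pvMergeSort sc (List.take k seg)).2 (List.drop k seg)).2.length := by
        rw [Len2, Len1]
        exact fun vp hv => hidx vp (List.mem_of_mem_take (P1.subset hv))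
      rw [pvMerge_snd _ _ _ S1 S2 hidx1 q (by rw [Len2, Len1]; exact hq)]
      rw [C2 q (by rw [Len1]; exact hq), C1 q hq]
      rw [addc_perm_left _ q P1, addc_perm_right _ q P2]
      have := invc_append (List.take k seg) (List.drop k seg) q
      rw [List.take_append_drop] at this
      rw [this]
      push_cast
      ring

lemma countP_zipIdx (t : List Int) (s : Nat) (P : Int → Bool) :
    (t.zipIdx s).countP (fun w => P w.1) = t.countP P := by
  induction t generalizing s with
  | nil => simp
  | cons a t ih => simp [List.countP_cons, ih]

lemma invc_zipIdx (l : List Int) (s q : Nat) :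
    invc (l.zipIdx s) q =
      if q < s then 0
      else (l.drop (q - s + 1)).countP (fun y => l.getD (q - s) 0 < y) := by
  induction l generalizing s with
  | nil => simp [invc]
  | cons a t ih =>
    simp only [List.zipIdx_cons, invc, ih (s + 1)]
    rcases Nat.lt_trichotomy q s with h | h | h
    · rw [if_neg (show ¬ s = q by omega), if_pos (show q < s + 1 by omega), if_pos h]
    · subst h
      rw [if_pos rfl, if_pos (by omega), if_neg (by omega)]
      simp only [Nat.sub_self, List.drop_succ_cons, List.drop_zero, List.getD_cons_zero,
        Nat.add_zero]
      exact countP_zipIdx t (q + 1) (fun y => decide (a < y))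
    · rw [if_neg (show ¬ s = q by omega), if_neg (show ¬ q < s + 1 by omega),
        if_neg (show ¬ q < s by omega)]
      have h1 : q - s = (q - (s + 1)) + 1 := by omega
      simp [h1]

-- ===== VERDICT (by name: the statement is the Claim_ definition above) =====
theorem find_surpasser_merge_sort_spec : Claim_equal_find_surpasser_merge_sort := by
  intro arr _
  unfold Spec_find_surpasser_merge_sort
  by_cases harr : arr = []
  · subst harr; rfl
  · unfold find_surpasser_merge_sort find_surpasser_merge_sort_alt
    rw [if_neg harr]
    have hidx : ∀ vp ∈ arr.zipIdx, vp.2 < (List.replicate arr.length (0 : Int)).length := by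
      intro vp hv
      obtain ⟨v, i⟩ := vp
      have h := List.mem_zipIdx hv
      simpa using h.2.1
    obtain ⟨-, -, hlen, hcnt⟩ := pvMergeSort_spec _ _ hidx
    apply List.ext_getElem
    · rw [hlen]; simp
    · intro q h1 h2
      have hq : q < arr.length := by simpa using h2
      have hcq := hcnt q (by simpa using hq)
      rw [List.getElem?_eq_getElem h1] at hcq
      simp only [Option.getD_some] at hcq
      rw [hcq]
      rw [invc_zipIdx arr 0 q]
      rw [if_neg (by omega)]
      have hget : (List.replicate arr.length (0 : Int))[q]?.getD 0 = 0 := by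
        simp [hq]
      rw [hget, zero_add, Nat.sub_zero]
      have hmap : ((arr.zipIdx.map
          (fun xi => (((arr.drop (xi.2 + 1)).countP (fun y => xi.1 < y) : Nat) : Int)))[q]'h2) =
          (((arr.drop (q + 1)).countP (fun y => arr[q]'hq < y) : Nat) : Int) := by
        rw [List.getElem_map]
        have hz : (arr.zipIdx)[q]'(by simpa using hq) = (arr[q]'hq, q) := by
          simp [List.getElem_zipIdx (l := arr) (j := 0) (i := q) (by simpa using hq)]
        rw [hz]
      rw [hmap]
      congr 1
      apply List.countP_congr
      intro y _
      have hgd : arr[q]?.getD 0 = arr[q]'hq := by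
        rw [List.getElem?_eq_getElem hq]; rfl
      simp [hgd]
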